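-- pv_equiv track=rewrite | github.com/DanielCorydon/brev_kodning_automization | src/helper_modules/extract_fields_from_documents.py | _find_nested_fields
-- ===== SOURCE A (Python) =====
-- from typing import List, Dict, Any, Optional
--
-- def _find_nested_fields(field_code: str) -> List[str]:
--     """
--     Find nested fields within a field code.
--
--     Args:
--         field_code (str): The field code to search for nested fields
--
--     Returns:
--         List[str]: List of nested field codes
--     """
--     nested_fields = []
--
--     # Look for patterns like { MERGEFIELD ... } within the field code
--     i = 0
--     while i < len(field_code):
--         if field_code[i] == "{":
--             # Find the matching closing brace
--             brace_count = 1
--             j = i + 1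
--             while j < len(field_code) and brace_count > 0:
--                 if field_code[j] == "{":
--                     brace_count += 1
--                 elif field_code[j] == "}":
--                     brace_count -= 1
--                 j += 1
--
--             if brace_count == 0:
--                 nested_field = field_code[i:j].strip()
--                 nested_fields.append(nested_field)
--                 i = j
--             else:
--                 i += 1
--         else:
--             i += 1
--
--     return nested_fields
-- ===== SOURCE B (Python) =====
-- def _find_nested_fields(field_code: str) -> list:
--     """
--     Find nested fields within a field code.
--
--     One-pass stack bracket matching: collect every matched brace pair, then
--     keep the maximal (top-level among matched) pairs by a running-minimum
--     scan of the pair list from the end.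
--     """
--     stack = []
--     pairs = []
--     for i, ch in enumerate(field_code):
--         if ch == "{":
--             stack.append(i)
--         elif ch == "}" and stack:
--             pairs.append((stack.pop(), i))
--
--     out = []
--     bound = len(field_code)
--     # pairs are nested-or-disjoint and appear in pop order, so scanning from
--     # the end, a pair is maximal exactly when its start is a new minimum
--     for a, e in reversed(pairs):
--         if a < bound:
--             out.append(field_code[a:e + 1].strip())
--             bound = a
--     out.reverse()
--     return out
-- ===== Notes on version B (the rewrite author's own statement) =====
-- stated objective: faster
-- what changed: A rescans forward from every open brace counting braces (quadratic on nested/unmatched input); B does one stack pass collecting all matched brace pairs and then one backward running-minimum scan over the pair list to keep exactly the maximal (top-level) pairs.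
import Mathlib
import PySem

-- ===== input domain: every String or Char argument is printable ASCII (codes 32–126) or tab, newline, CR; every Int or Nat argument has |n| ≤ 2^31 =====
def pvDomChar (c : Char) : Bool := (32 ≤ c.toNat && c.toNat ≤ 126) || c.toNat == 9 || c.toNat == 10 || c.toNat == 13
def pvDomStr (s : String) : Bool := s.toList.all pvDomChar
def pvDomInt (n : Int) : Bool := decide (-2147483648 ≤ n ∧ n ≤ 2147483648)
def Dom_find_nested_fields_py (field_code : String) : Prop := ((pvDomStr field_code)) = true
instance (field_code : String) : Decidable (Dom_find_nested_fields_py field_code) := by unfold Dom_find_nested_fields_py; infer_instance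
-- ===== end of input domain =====

-- B replaces A's quadratic rescan-from-every-'{' with one stack pass over the string plus one
-- backward running-minimum scan over the collected matched pairs (objective: faster).

-- ===== PORT A =====
-- A's inner while loop: scan the suffix with brace_count = cnt, return the number of consumed
-- characters when the count reaches 0 (Python's j - i - 1 + 1), none if it never does.
def innerA : List Char → Nat → Option Nat
  | [], _ => none
  | c :: t, cnt =>
    let cnt' := if c = '{' then cnt + 1 else if c = '}' then cnt - 1 else cnt
    if cnt' = 0 then some 1 else (innerA t cnt').map (· + 1)

-- A's outer while loop over i, as the obvious structural recursion on the suffix at i;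
-- the slice field_code[i:j].strip() is '{' ++ the consumed inner characters, stripped.
def outerA : List Char → List String
  | [] => []
  | c :: t =>
    if c = '{' then
      match innerA t 1 with
      | some m => PySem.Str.strip (String.ofList (c :: t.take m)) :: outerA (t.drop m)
      | none => outerA t
    else outerA t
termination_by cs => cs.length
decreasing_by
  all_goals (simp [List.length_drop]; try omega)

def find_nested_fields_py (field_code : String) : List String :=
  outerA field_code.toList

-- ===== PORT B =====
-- Source B's first loop: enumerate the characters with a stack of open-brace indices,
-- appending a (start, end) pair at every pop; returns (stack, pairs).
def runB : List Char → Nat → List Nat → List (Nat × Nat) → List Nat × List (Nat × Nat)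
  | [], _, st, acc => (st, acc)
  | c :: t, i, st, acc =>
    if c = '{' then runB t (i + 1) (i :: st) acc
    else if c = '}' then
      match st with
      | [] => runB t (i + 1) [] acc
      | a :: st' => runB t (i + 1) st' (acc ++ [(a, i)])
    else runB t (i + 1) st acc

-- field_code[a:e+1].strip() for the in-range 0 ≤ a ≤ e < len produced by runB (exact there)
def emitB (cs : List Char) (a e : Nat) : String :=
  PySem.Str.strip (String.ofList ((cs.take (e + 1)).drop a))

-- Source B's second loop over reversed(pairs) with the running minimum `bound`; returns (out, bound).
def p2 (cs : List Char) : List (Nat × Nat) → Nat → List String → List String × Nat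
  | [], bound, out => (out, bound)
  | (a, e) :: r, bound, out =>
    if a < bound then p2 cs r a (out ++ [emitB cs a e]) else p2 cs r bound out

def altL (cs : List Char) : List String :=
  ((p2 cs (runB cs 0 [] []).2.reverse cs.length []).1).reverse

def find_nested_fields_py_alt (field_code : String) : List String :=
  altL field_code.toList

-- ===== PRECONDITION & SPEC =====
def Spec_find_nested_fields_py (field_code : String) (out : List String) : Prop := out = find_nested_fields_py_alt field_code
instance (field_code : String) (out : List String) : Decidable (Spec_find_nested_fields_py field_code out) := by unfold Spec_find_nested_fields_py; infer_instance

-- ===== CLAIM (what is proved, stated in full; the proofs are below) =====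
def Claim_equal_find_nested_fields_py : Prop := ∀ (field_code : String), Dom_find_nested_fields_py field_code → Spec_find_nested_fields_py field_code (find_nested_fields_py field_code)

-- ===== LEMMAS AND PROOFS =====

lemma runB_acc (t : List Char) (i : Nat) (st : List Nat) (acc : List (Nat × Nat)) :
    runB t i st acc = ((runB t i st []).1, acc ++ (runB t i st []).2) := by
  induction t generalizing i st acc with
  | nil => simp [runB]
  | cons c t ih =>
    by_cases h1 : c = '{'
    · simp only [runB, if_pos h1]; exact ih ..
    · by_cases h2 : c = '}'
      · cases st with
        | nil => simp only [runB, if_neg h1, if_pos h2]; exact ih ..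
        | cons a st' =>
          simp only [runB, if_neg h1, if_pos h2]
          rw [ih (i+1) st' (acc ++ [(a,i)]), ih (i+1) st' ([] ++ [(a,i)])]
          simp
      · simp only [runB, if_neg h1, if_neg h2]; exact ih ..

lemma runB_append (u v : List Char) (i : Nat) (st : List Nat) (acc : List (Nat × Nat)) :
    runB (u ++ v) i st acc = runB v (i + u.length) (runB u i st acc).1 (runB u i st acc).2 := by
  induction u generalizing i st acc with
  | nil => simp [runB]
  | cons c u ih =>
    have harith : i + (c :: u).length = (i + 1) + u.length := by simp; omega
    by_cases h1 : c = '{'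
    · simp only [List.cons_append, runB, if_pos h1, harith]; exact ih ..
    · by_cases h2 : c = '}'
      · cases st with
        | nil => simp only [List.cons_append, runB, if_neg h1, if_pos h2, harith]; exact ih ..
        | cons a st' => simp only [List.cons_append, runB, if_neg h1, if_pos h2, harith]; exact ih ..
      · simp only [List.cons_append, runB, if_neg h1, if_neg h2, harith]; exact ih ..

lemma runB_shift (t : List Char) (i k : Nat) (st : List Nat) :
    runB t (i + k) (st.map (· + k)) [] =
      ((runB t i st []).1.map (· + k), (runB t i st []).2.map (fun p => (p.1 + k, p.2 + k))) := by
  induction t generalizing i st with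
  | nil => simp [runB]
  | cons c t ih =>
    by_cases h1 : c = '{'
    · simp only [runB, if_pos h1]
      have : (i + k) + 1 = (i + 1) + k := by omega
      rw [this]
      have := ih (i + 1) ((i :: st))
      simpa using this
    · by_cases h2 : c = '}'
      · cases st with
        | nil =>
          simp only [runB, if_neg h1, if_pos h2, List.map_nil]
          have : (i + k) + 1 = (i + 1) + k := by omega
          rw [this]; simpa using ih (i + 1) []
        | cons a st' =>
          simp only [runB, if_neg h1, if_pos h2, List.map_cons]
          have harith : (i + k) + 1 = (i + 1) + k := by omega
          rw [harith, runB_acc, ih (i + 1) st', runB_acc t (i+1) st' ([] ++ [(a, i)])]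
          simp
      · simp only [runB, if_neg h1, if_neg h2]
        have : (i + k) + 1 = (i + 1) + k := by omega
        rw [this]; exact ih ..

lemma innerA_le (t : List Char) (c m : Nat) (h : innerA t c = some m) : 1 ≤ m ∧ m ≤ t.length := by
  induction t generalizing c m with
  | nil => simp [innerA] at h
  | cons a t ih =>
    simp only [innerA] at h
    repeat' split at h
    all_goals
      first
        | (simp only [Option.some.injEq] at h; subst h; simp)
        | (rw [Option.map_eq_some_iff] at h; obtain ⟨m', hm', rfl⟩ := h;
           have h2 := ih _ _ hm'; simp; omega)

lemma runB_none (t : List Char) (st : List Nat) (b i : Nat)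
    (h : innerA t (st.length + 1) = none) :
    runB t i (st ++ [b]) [] = ((runB t i st []).1 ++ [b], (runB t i st []).2) := by
  induction t generalizing st i with
  | nil => simp [runB]
  | cons c t ih =>
    simp only [innerA] at h
    by_cases h1 : c = '{'
    · simp only [if_pos h1] at h
      have hne : ¬ (st.length + 1 + 1 = 0) := by omega
      rw [if_neg hne, Option.map_eq_none_iff] at h
      simp only [runB, if_pos h1]
      have := ih (i :: st) (i + 1) (by simpa using h)
      simpa using this
    · by_cases h2 : c = '}'
      · simp only [if_neg h1, if_pos h2] at h
        cases st with
        | nil => simp at h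
        | cons a st' =>
          have hne : ¬ ((a :: st').length + 1 - 1 = 0) := by simp
          rw [if_neg hne, Option.map_eq_none_iff] at h
          have h' : innerA t (st'.length + 1) = none := by
            simpa using h
          simp only [runB, if_neg h1, if_pos h2, List.cons_append]
          rw [runB_acc t (i+1) (st' ++ [b]), runB_acc t (i+1) st', ih st' (i+1) h']
      · simp only [if_neg h1, if_neg h2] at h
        have hne : ¬ (st.length + 1 = 0) := by omega
        rw [if_neg hne, Option.map_eq_none_iff] at h
        simp only [runB, if_neg h1, if_neg h2]
        exact ih st (i + 1) h

lemma runB_some (t : List Char) (m : Nat) (st : List Nat) (b i : Nat)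
    (h : innerA t (st.length + 1) = some m) :
    ∃ P, runB (t.take m) i (st ++ [b]) [] = ([], P ++ [(b, i + m - 1)]) := by
  induction t generalizing st i m with
  | nil => simp [innerA] at h
  | cons c t ih =>
    simp only [innerA] at h
    by_cases h1 : c = '{'
    · simp only [if_pos h1] at h
      have hne : ¬ (st.length + 1 + 1 = 0) := by omega
      rw [if_neg hne, Option.map_eq_some_iff] at h
      obtain ⟨m', hm', rfl⟩ := h
      obtain ⟨P, hP⟩ := ih m' (i :: st) (i + 1) (by simpa using hm')
      refine ⟨P, ?_⟩
      simp only [List.take_succ_cons, runB, if_pos h1]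
      have harith : i + 1 + m' - 1 = i + (m' + 1) - 1 := by omega
      rw [← harith]
      simpa using hP
    · by_cases h2 : c = '}'
      · simp only [if_neg h1, if_pos h2] at h
        cases st with
        | nil =>
          simp only [List.length_nil] at h
          simp only [Nat.add_sub_cancel, if_pos] at h
          simp only [Option.some.injEq] at h
          subst h
          refine ⟨[], ?_⟩
          simp [runB, if_neg h1, if_pos h2]
        | cons a st' =>
          have hne : ¬ ((a :: st').length + 1 - 1 = 0) := by simp
          rw [if_neg hne, Option.map_eq_some_iff] at h
          obtain ⟨m', hm', rfl⟩ := h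
          obtain ⟨P, hP⟩ := ih m' st' (i + 1) (by simpa using hm')
          refine ⟨(a, i) :: P, ?_⟩
          simp only [List.take_succ_cons, runB, if_neg h1, if_pos h2, List.cons_append]
          rw [runB_acc, hP]
          have harith : i + 1 + m' - 1 = i + (m' + 1) - 1 := by omega
          simp [harith]
      · simp only [if_neg h1, if_neg h2] at h
        have hne : ¬ (st.length + 1 = 0) := by omega
        rw [if_neg hne, Option.map_eq_some_iff] at h
        obtain ⟨m', hm', rfl⟩ := h
        obtain ⟨P, hP⟩ := ih m' st (i + 1) hm'
        refine ⟨P, ?_⟩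
        simp only [List.take_succ_cons, runB, if_neg h1, if_neg h2]
        have harith : i + 1 + m' - 1 = i + (m' + 1) - 1 := by omega
        rw [← harith]
        exact hP

lemma p2_acc (cs : List Char) (l : List (Nat × Nat)) (b : Nat) (out : List String) :
    p2 cs l b out = (out ++ (p2 cs l b []).1, (p2 cs l b []).2) := by
  induction l generalizing b out with
  | nil => simp [p2]
  | cons p r ih =>
    obtain ⟨a, e⟩ := p
    by_cases hab : a < b
    · simp only [p2, if_pos hab]
      rw [ih a (out ++ [emitB cs a e]), ih a ([] ++ [emitB cs a e])]
      simp
    · simp only [p2, if_neg hab]; exact ih ..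

lemma p2_append (cs : List Char) (l1 l2 : List (Nat × Nat)) (b : Nat) (out : List String) :
    p2 cs (l1 ++ l2) b out = p2 cs l2 (p2 cs l1 b out).2 (p2 cs l1 b out).1 := by
  induction l1 generalizing b out with
  | nil => simp [p2]
  | cons p r ih =>
    obtain ⟨a, e⟩ := p
    by_cases hab : a < b
    · simp only [List.cons_append, p2, if_pos hab]; exact ih ..
    · simp only [List.cons_append, p2, if_neg hab]; exact ih ..

lemma p2_zero (cs : List Char) (l : List (Nat × Nat)) (out : List String) :
    p2 cs l 0 out = (out, 0) := by
  induction l with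
  | nil => simp [p2]
  | cons p r ih =>
    obtain ⟨a, e⟩ := p
    simp only [p2, if_neg (Nat.not_lt_zero a)]
    exact ih

lemma emit_shift (cs : List Char) (a e k : Nat) :
    emitB cs (a + k) (e + k) = emitB (cs.drop k) a e := by
  unfold emitB
  congr 2
  rw [show a + k = k + a by omega, ← List.drop_drop]
  congr 1
  rw [List.drop_take]
  congr 1
  omega

lemma p2_shift (l : List (Nat × Nat)) (cs : List Char) (k b : Nat) (out : List String) :
    p2 cs (l.map (fun p => (p.1 + k, p.2 + k))) (b + k) out =
      (out ++ (p2 (cs.drop k) l b []).1, (p2 (cs.drop k) l b []).2 + k) := by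
  induction l generalizing b out with
  | nil => simp [p2]
  | cons p r ih =>
    obtain ⟨a, e⟩ := p
    by_cases hab : a < b
    · have hab' : a + k < b + k := by omega
      simp only [List.map_cons, p2, if_pos hab, if_pos hab', emit_shift]
      rw [ih a (out ++ [emitB (cs.drop k) a e]), p2_acc (cs.drop k) r a ([] ++ [emitB (cs.drop k) a e])]
      simp
    · have hab' : ¬ (a + k < b + k) := by omega
      simp only [List.map_cons, p2, if_neg hab, if_neg hab']
      exact ih ..

lemma altL_tail (c : Char) (t : List Char)
    (h : (runB (c :: t) 0 [] []).2 = (runB t 1 [] []).2) :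
    altL (c :: t) = altL t := by
  unfold altL
  have h2 : (runB t 1 [] []).2 = (runB t 0 [] []).2.map (fun p => (p.1 + 1, p.2 + 1)) := by
    have hs := runB_shift t 0 1 []
    simp only [List.map_nil, Nat.zero_add] at hs
    rw [hs]
  rw [h, h2, ← List.map_reverse]
  have hlen : (c :: t).length = t.length + 1 := by simp
  rw [hlen, p2_shift]
  simp

lemma main_equiv : ∀ (n : Nat) (cs : List Char), cs.length ≤ n → outerA cs = altL cs := by
  intro n
  induction n with
  | zero =>
    intro cs h
    have hnil : cs = [] := List.eq_nil_of_length_eq_zero (Nat.le_zero.mp h)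
    subst hnil
    simp [outerA, altL, runB, p2]
  | succ n ih =>
    intro cs h
    match cs with
    | [] => simp [outerA, altL, runB, p2]
    | c :: t =>
      have ht : t.length ≤ n := by simp at h; omega
      by_cases h1 : c = '{'
      · cases hinner : innerA t 1 with
        | none =>
          have hA : outerA (c :: t) = outerA t := by
            rw [outerA]; simp [h1, hinner]
          have hpairs : (runB (c :: t) 0 [] []).2 = (runB t 1 [] []).2 := by
            simp only [runB, if_pos h1]
            have hn := runB_none t [] 0 1 (by simpa using hinner)
            simp only [List.nil_append] at hn
            rw [hn]
          rw [hA, altL_tail c t hpairs]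
          exact ih t ht
        | some m =>
          obtain ⟨hm1, hm2⟩ := innerA_le t 1 m hinner
          obtain ⟨P, hP⟩ := runB_some t m [] 0 1 (by simpa using hinner)
          simp only [List.nil_append] at hP
          have hm' : 1 + m - 1 = m := by omega
          rw [hm'] at hP
          have hlen : (t.take m).length = m := by
            rw [List.length_take, min_eq_left hm2]
          have hpairs : (runB (c :: t) 0 [] []).2 =
              (P ++ [(0, m)]) ++
                ((runB (t.drop m) 0 [] []).2.map (fun p => (p.1 + (m + 1), p.2 + (m + 1)))) := by
            simp only [runB, if_pos h1]
            conv_lhs => rw [← List.take_append_drop m t]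
            rw [runB_append, hP, hlen]
            rw [runB_acc]
            have hsh := runB_shift (t.drop m) 0 (m + 1) []
            simp only [List.map_nil, Nat.zero_add] at hsh
            rw [show 1 + m = m + 1 by omega, hsh]
          have hAlt : altL (c :: t) = emitB (c :: t) 0 m :: altL (t.drop m) := by
            unfold altL
            rw [hpairs, List.reverse_append, List.reverse_append, ← List.map_reverse]
            have hlen2 : (c :: t).length = (t.drop m).length + (m + 1) := by
              simp [List.length_drop]; omega
            rw [hlen2, p2_append, p2_shift]
            simp only [List.drop_succ_cons, List.reverse_cons, List.reverse_nil,
              List.nil_append, List.nil_append]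
            rw [List.singleton_append, p2, if_pos (by omega : 0 < (p2 (t.drop m) (runB (t.drop m) 0 [] []).2.reverse (t.drop m).length []).2 + (m + 1))]
            rw [p2_zero]
            simp
          have hemit : emitB (c :: t) 0 m = PySem.Str.strip (String.ofList (c :: t.take m)) := by
            unfold emitB
            simp [List.take_succ_cons]
          have hA : outerA (c :: t) =
              PySem.Str.strip (String.ofList (c :: t.take m)) :: outerA (t.drop m) := by
            rw [outerA]; simp [h1, hinner]
          rw [hA, hAlt, hemit]
          have hd : (t.drop m).length ≤ n := by
            simp only [List.length_drop]; omega
          rw [ih (t.drop m) hd]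
      · have hA : outerA (c :: t) = outerA t := by
          rw [outerA]; simp [h1]
        have hpairs : (runB (c :: t) 0 [] []).2 = (runB t 1 [] []).2 := by
          by_cases h2 : c = '}'
          · simp [runB, h2]
          · simp [runB, h1, h2]
        rw [hA, altL_tail c t hpairs]
        exact ih t ht

-- ===== VERDICT (by name: the statement is the Claim_ definition above) =====
theorem find_nested_fields_py_spec : Claim_equal_find_nested_fields_py := by
  intro fc _
  unfold Spec_find_nested_fields_py find_nested_fields_py find_nested_fields_py_alt
  exact main_equiv fc.toList.length fc.toList le_rfl
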